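-- pv_equiv track=rewrite | github.com/prasanna31/Data-structures-and-Algorithms | Arrays.py | sort_according_to_another
-- ===== SOURCE A (Python) =====
-- from collections import Counter, defaultdict
-- from collections import Counter
--
-- def sort_according_to_another(arr1, arr2):
--         count = Counter(arr1)
--         res = []
--         for num in arr2:
--             res += [num] * count[num]  # Add in arr2 order
--             count[num] = 0
--         for num in sorted(count.elements()):
--             res.append(num)  # Add remaining sorted
--         return res
-- ===== SOURCE B (Python) =====
-- def sort_according_to_another(arr1, arr2):
--     rank = {}
--     for i, v in enumerate(arr2):
--         if v not in rank:
--             rank[v] = i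
--     return sorted(arr1, key=lambda x: (0, rank[x]) if x in rank else (1, x))
-- ===== Notes on version B (the rewrite author's own statement) =====
-- stated objective: idiomatic
-- what changed: Replaced A's Counter-plus-bucket-emission loop over arr2 followed by a separate sort of leftovers with a single stable key-sort of arr1 using a first-occurrence rank dict built from arr2 ((0, rank[x]) for arr2 values, (1, x) for the rest).
import Mathlib
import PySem

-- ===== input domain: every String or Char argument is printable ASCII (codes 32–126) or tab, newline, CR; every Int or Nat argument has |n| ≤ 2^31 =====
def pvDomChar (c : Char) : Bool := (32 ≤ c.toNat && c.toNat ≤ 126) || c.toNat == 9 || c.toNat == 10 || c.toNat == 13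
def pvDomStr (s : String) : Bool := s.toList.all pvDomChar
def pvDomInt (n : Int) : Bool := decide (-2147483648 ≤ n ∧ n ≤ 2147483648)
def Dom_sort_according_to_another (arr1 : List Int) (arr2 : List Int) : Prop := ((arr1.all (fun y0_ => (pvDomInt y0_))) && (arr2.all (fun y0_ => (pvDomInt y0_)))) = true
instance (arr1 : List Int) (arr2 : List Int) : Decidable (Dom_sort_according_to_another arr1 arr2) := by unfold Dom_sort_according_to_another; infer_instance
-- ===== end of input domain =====

-- B replaces A's Counter-plus-bucket-emission loop and separate leftover sort by one stable
-- key-sort of arr1 with a first-occurrence rank dict built from arr2 (objective: idiomatic).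

-- ===== PORT A =====
-- count = Counter(arr1); for num in arr2: res += [num]*count[num]; count[num] = 0;
-- then append sorted(count.elements()).  Counter.elements() = each key repeated its
-- (positive) count, in key-insertion order, modelled by items.flatMap replicate.
def sort_according_to_another (arr1 : List Int) (arr2 : List Int) : List Int :=
  let count := PySem.Dict.counter arr1
  let st := arr2.foldl (fun (st : List Int × PySem.Dict Int Int) num =>
      (st.1 ++ PySem.List.pyRepeat [num] (st.2.getD num 0), st.2.insert num 0)) ([], count)
  st.1 ++ PySem.List.sorted (st.2.items.flatMap (fun p => List.replicate p.2.toNat p.1)) (fun x => x) false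

-- ===== PORT B =====
-- rank = {}; for i, v in enumerate(arr2): if v not in rank: rank[v] = i;
-- return sorted(arr1, key=lambda x: (0, rank[x]) if x in rank else (1, x))
def sort_according_to_another_alt (arr1 : List Int) (arr2 : List Int) : List Int :=
  let rank := (PySem.List.enumerate arr2).foldl (fun (d : PySem.Dict Int Int) p =>
      if d.contains p.2 then d else d.insert p.2 p.1) PySem.Dict.empty
  PySem.List.sorted2 arr1
    (fun x => if rank.contains x then (0 : Int) else 1)
    (fun x => if rank.contains x then rank.getD x 0 else x) false

-- ===== PRECONDITION & SPEC =====
def Spec_sort_according_to_another (arr1 : List Int) (arr2 : List Int) (out : List Int) : Prop := out = sort_according_to_another_alt arr1 arr2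
instance (arr1 : List Int) (arr2 : List Int) (out : List Int) : Decidable (Spec_sort_according_to_another arr1 arr2 out) := by unfold Spec_sort_according_to_another; infer_instance

-- ===== CLAIM (what is proved, stated in full; the proofs are below) =====
def Claim_equal_sort_according_to_another : Prop := ∀ (arr1 : List Int) (arr2 : List Int), Dom_sort_according_to_another arr1 arr2 → Spec_sort_according_to_another arr1 arr2 (sort_according_to_another arr1 arr2)

-- ===== LEMMAS AND PROOFS =====

-- B's rank dict, as a standalone function for the proofs
def rankOf (arr2 : List Int) : PySem.Dict Int Int :=
  (PySem.List.enumerate arr2).foldl (fun (d : PySem.Dict Int Int) p =>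
      if d.contains p.2 then d else d.insert p.2 p.1) PySem.Dict.empty

-- B's sort key, as a single lexicographic key
def keyF (arr2 : List Int) (x : Int) : Int ×ₗ Int :=
  if (rankOf arr2).contains x then toLex (0, (rankOf arr2).getD x 0) else toLex (1, x)

-- sorted2 with two keys is sorted with the lexicographic pair key
theorem sorted2_eq_sorted_lex {α : Type} (xs : List α) (k1 k2 : α → Int) :
    PySem.List.sorted2 xs k1 k2 false = PySem.List.sorted xs (fun x => toLex (k1 x, k2 x)) false := by
  simp only [PySem.List.sorted2, PySem.List.sorted, Bool.false_eq_true, if_false]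
  have h : (fun (a b : α) => decide (k1 a < k1 b) || !decide (k1 b < k1 a) && decide (k2 a < k2 b))
      = (fun (a b : α) => decide (toLex (k1 a, k2 a) < toLex (k1 b, k2 b))) := by
    funext a b
    simp only [Prod.Lex.toLex_lt_toLex]
    by_cases h1 : k1 a < k1 b
    · simp [h1]
    · by_cases h2 : k1 b < k1 a
      · simp [h1, h2, ne_of_gt h2]
      · have he : k1 a = k1 b := le_antisymm (le_of_not_gt h2) (le_of_not_gt h1)
        simp [he]
  rw [h]

theorem alt_eq_sorted (arr1 arr2 : List Int) :
    sort_according_to_another_alt arr1 arr2 = PySem.List.sorted arr1 (keyF arr2) false := by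
  show PySem.List.sorted2 arr1
      (fun x => if (rankOf arr2).contains x then (0 : Int) else 1)
      (fun x => if (rankOf arr2).contains x then (rankOf arr2).getD x 0 else x) false = _
  rw [sorted2_eq_sorted_lex]
  congr 1
  funext x
  unfold keyF
  by_cases h : (rankOf arr2).contains x <;> simp [h]

-- rank lookup = first index in arr2
theorem enumerate_cons (x : Int) (t : List Int) (n : Int) :
    PySem.List.enumerate (x :: t) n = (n, x) :: PySem.List.enumerate t (n + 1) := rfl

theorem rank_fold_get? (l : List Int) (n : Int) (d : PySem.Dict Int Int) (v : Int) :
    ((PySem.List.enumerate l n).foldl (fun (d : PySem.Dict Int Int) p =>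
        if d.contains p.2 then d else d.insert p.2 p.1) d).get? v
      = ((d.get? v).orElse (fun _ => (PySem.List.index? l v).map (fun k => ((k : Int) + n)))) := by
  induction l generalizing n d with
  | nil =>
    simp [PySem.List.index?_eq_idxOf?, List.idxOf?, PySem.List.enumerate, Option.orElse]
    cases d.get? v <;> rfl
  | cons x t ih =>
    rw [enumerate_cons, List.foldl_cons]
    by_cases hc : d.contains x
    · simp only [hc, if_true]
      rw [ih]
      by_cases hv : v = x
      · subst hv
        have : ∃ w, d.get? v = some w := by
          rw [PySem.Dict.contains_eq_isSome_get?] at hc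
          exact Option.isSome_iff_exists.mp hc
        obtain ⟨w, hw⟩ := this
        simp [hw, Option.orElse]
      · rw [PySem.List.index?_cons_of_ne t (fun h => hv h.symm)]
        cases hg : d.get? v with
        | some w => simp [Option.orElse]
        | none =>
          simp only [Option.orElse]
          cases hi : PySem.List.index? t v with
          | none => rfl
          | some k => simp; ring
    · simp only [hc, Bool.false_eq_true, if_false]
      rw [ih]
      by_cases hv : v = x
      · subst hv
        have hg : d.get? v = none := by
          rw [PySem.Dict.contains_eq_isSome_get?] at hc
          cases h : d.get? v; · rfl
          · rw [h] at hc; simp at hc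
        rw [PySem.Dict.get?_insert_self]
        have hidx : List.idxOf? v (v :: t) = some 0 := by simp [List.idxOf?_cons]
        simp [hg, hidx, Option.orElse]
      · rw [PySem.Dict.get?_insert_of_ne _ _ hv]
        rw [PySem.List.index?_cons_of_ne t (fun h => hv h.symm)]
        cases hg : d.get? v with
        | some w => simp [Option.orElse]
        | none =>
          simp only [Option.orElse]
          cases hi : PySem.List.index? t v with
          | none => rfl
          | some k => simp; ring

theorem rank_get? (arr2 : List Int) (v : Int) :
    (rankOf arr2).get? v = (PySem.List.index? arr2 v).map (fun k => (k : Int)) := by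
  unfold rankOf
  rw [show (PySem.List.enumerate arr2) = (PySem.List.enumerate arr2 0) from rfl,
     rank_fold_get? arr2 0 PySem.Dict.empty v, PySem.Dict.get?_empty]
  cases h : PySem.List.index? arr2 v <;> simp [Option.orElse]



theorem index?_none_iff (xs : List Int) (v : Int) :
    PySem.List.index? xs v = none ↔ v ∉ xs := by
  simp [PySem.List.index?_eq_idxOf?]

theorem contains_rank (arr2 : List Int) (v : Int) :
    (rankOf arr2).contains v = true ↔ v ∈ arr2 := by
  rw [PySem.Dict.contains_eq_isSome_get?, rank_get?]
  cases h : PySem.List.index? arr2 v with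
  | none => simp [(index?_none_iff arr2 v).mp h]
  | some k =>
    obtain ⟨hk, he, _⟩ := PySem.List.getElem_of_index?_eq_some h
    simp [he ▸ List.getElem_mem hk]


theorem keyF_inj (arr2 : List Int) : Function.Injective (keyF arr2) := by
  intro x y h
  unfold keyF at h
  by_cases cx : (rankOf arr2).contains x <;> by_cases cy : (rankOf arr2).contains y <;>
    simp [cx, cy] at h
  · -- both in rank
    obtain ⟨ix, hix⟩ := Option.isSome_iff_exists.mp ((PySem.Dict.contains_eq_isSome_get? _ x) ▸ cx)
    obtain ⟨iy, hiy⟩ := Option.isSome_iff_exists.mp ((PySem.Dict.contains_eq_isSome_get? _ y) ▸ cy)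
    rw [rank_get?] at hix hiy
    cases hkx : PySem.List.index? arr2 x with
    | none => rw [hkx] at hix; simp at hix
    | some kx =>
    cases hky : PySem.List.index? arr2 y with
    | none => rw [hky] at hiy; simp at hiy
    | some ky =>
    have hgx : (rankOf arr2).getD x 0 = (kx : Int) := by
      rw [PySem.Dict.getD_eq_get?_getD, rank_get?, hkx]; rfl
    have hgy : (rankOf arr2).getD y 0 = (ky : Int) := by
      rw [PySem.Dict.getD_eq_get?_getD, rank_get?, hky]; rfl
    rw [hgx, hgy] at h
    have hkk : kx = ky := by exact_mod_cast h
    subst hkk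
    obtain ⟨h1, h2, _⟩ := PySem.List.getElem_of_index?_eq_some hkx
    obtain ⟨h1', h2', _⟩ := PySem.List.getElem_of_index?_eq_some hky
    rw [← h2, ← h2']
  · exact h


-- ======== A-side characterisation ========

-- first loop of A, fully generalised
theorem flatMap_insert_zero (L : List Int) (d : PySem.Dict Int Int) (x : Int) :
    L.flatMap (fun v => List.replicate (((d.insert x (0:Int)).getD v 0).toNat) v)
      = (L.filter (fun y => !(y == x))).flatMap (fun v => List.replicate ((d.getD v 0).toNat) v) := by
  induction L with
  | nil => simp
  | cons y t ih =>
    rw [List.flatMap_cons, List.filter_cons, ih]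
    by_cases hy : y = x
    · subst hy; simp [PySem.Dict.getD_insert_self]
    · rw [PySem.Dict.getD_insert_of_ne _ _ _ hy]
      simp [hy]

theorem dedup_cons (x : Int) (t : List Int) :
    PySem.List.dedup (x :: t) = x :: (PySem.List.dedup t).filter (fun y => !(y == x)) := by
  show PySem.Set.ofList (x :: t) = _
  have h1 : PySem.Set.ofList (x :: t) = PySem.Set.update (PySem.Set.add PySem.Set.empty x) t := rfl
  have h2 : PySem.Set.add PySem.Set.empty x = [x] := by
    simp [PySem.Set.add, PySem.Set.empty, PySem.Set.contains]
  have h3 : (fun y => !PySem.Set.contains [x] y) = (fun y => !(y == x)) := by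
    funext y; simp [PySem.Set.contains, List.contains_eq_mem]; exact Eq.symm (Bool.beq_eq_decide_eq y x)
  rw [h1, PySem.Set.update_eq_append_filter, h2, h3]
  rfl

theorem loopA (l : List Int) (res : List Int) (d : PySem.Dict Int Int) :
    l.foldl (fun (st : List Int × PySem.Dict Int Int) num =>
        (st.1 ++ PySem.List.pyRepeat [num] (st.2.getD num 0), st.2.insert num 0)) (res, d)
      = (res ++ (PySem.List.dedup l).flatMap (fun v => List.replicate (d.getD v 0).toNat v),
         l.foldl (fun (d : PySem.Dict Int Int) x => d.insert x 0) d) := by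
  induction l generalizing res d with
  | nil => simp [PySem.List.dedup, PySem.Set.ofList, PySem.Set.empty]
  | cons x t ih =>
    rw [List.foldl_cons, ih, List.foldl_cons]
    rw [dedup_cons, List.flatMap_cons, PySem.List.pyRepeat_singleton, flatMap_insert_zero]
    simp [List.append_assoc]

theorem foldl_insert_zero_getD (l : List Int) (d : PySem.Dict Int Int) (v : Int) :
    (l.foldl (fun (d : PySem.Dict Int Int) x => d.insert x 0) d).getD v 0
      = if v ∈ l then 0 else d.getD v 0 := by
  induction l generalizing d with
  | nil => simp
  | cons x t ih =>
    rw [List.foldl_cons, ih]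
    by_cases hm : v ∈ t
    · simp [hm]
    · by_cases hv : v = x
      · subst hv; simp [hm, PySem.Dict.getD_insert_self]
      · simp [hm, hv, PySem.Dict.getD_insert_of_ne _ _ _ hv]

theorem count_flatMap_replicate (L : List Int) (g : Int → Nat) (a : Int) (hL : L.Nodup) :
    List.count a (L.flatMap (fun v => List.replicate (g v) v)) = if a ∈ L then g a else 0 := by
  induction L with
  | nil => simp
  | cons x t ih =>
    have hx : x ∉ t := (List.nodup_cons.mp hL).1
    rw [List.flatMap_cons, List.count_append, ih (List.nodup_cons.mp hL).2]
    by_cases hv : a = x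
    · subst hv; simp [hx]
    · simp [hv, List.count_replicate, Ne.symm hv]

theorem pairwise_flatMap_replicate {κ : Type} [LinearOrder κ] (L : List Int) (g : Int → Nat)
    (K : Int → κ) (h : L.Pairwise (fun u w => K u ≤ K w)) :
    (L.flatMap (fun v => List.replicate (g v) v)).Pairwise (fun a b => K a ≤ K b) := by
  induction L with
  | nil => simp
  | cons x t ih =>
    rw [List.flatMap_cons, List.pairwise_append]
    obtain ⟨hx, ht⟩ := List.pairwise_cons.mp h
    refine ⟨?_, ih ht, ?_⟩
    · exact List.pairwise_replicate.mpr (Or.inr (le_refl (K x)))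
    · intro a ha b hb
      obtain ⟨v, hv, hbv⟩ := List.mem_flatMap.mp hb
      rw [List.eq_of_mem_replicate ha, List.eq_of_mem_replicate hbv]
      exact hx v hv

theorem dedup_index_pairwise (l : List Int) :
    (PySem.List.dedup l).Pairwise (fun u w => ∀ i j,
      PySem.List.index? l u = some i → PySem.List.index? l w = some j → i ≤ j) := by
  induction l with
  | nil => simp [PySem.List.dedup, PySem.Set.ofList, PySem.Set.empty]
  | cons x t ih =>
    rw [dedup_cons, List.pairwise_cons]
    constructor
    · intro w _ i j hi _
      have hix : PySem.List.index? (x :: t) x = some 0 := by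
        simp [PySem.List.index?_eq_idxOf?, List.idxOf?_cons]
      rw [hix] at hi
      injection hi with h0
      omega
    · refine (ih.filter _).imp_of_mem ?_
      intro u w hu hw hr i j hi hj
      have hux : u ≠ x := by
        have := List.of_mem_filter hu; simpa using this
      have hwx : w ≠ x := by
        have := List.of_mem_filter hw; simpa using this
      rw [PySem.List.index?_cons_of_ne t (fun h => hux h.symm)] at hi
      rw [PySem.List.index?_cons_of_ne t (fun h => hwx h.symm)] at hj
      cases hi' : PySem.List.index? t u with
      | none => rw [hi'] at hi; simp at hi
      | some i' =>
        cases hj' : PySem.List.index? t w with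
        | none => rw [hj'] at hj; simp at hj
        | some j' =>
          rw [hi'] at hi; rw [hj'] at hj
          simp at hi hj
          have := hr i' j' hi' hj'
          omega

-- ======== assembly ========

theorem getD_rank_of_index (arr2 : List Int) (v : Int) (k : Nat)
    (h : PySem.List.index? arr2 v = some k) : (rankOf arr2).getD v 0 = (k : Int) := by
  rw [PySem.Dict.getD_eq_get?_getD, rank_get?, h]; rfl

theorem mem_index?_some (arr2 : List Int) (v : Int) (h : v ∈ arr2) :
    ∃ k, PySem.List.index? arr2 v = some k := by
  cases hi : PySem.List.index? arr2 v with
  | none => exact absurd ((index?_none_iff arr2 v).mp hi) (not_not_intro h)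
  | some k => exact ⟨k, rfl⟩

theorem keyF_mem (arr2 : List Int) (v : Int) (h : v ∈ arr2) :
    keyF arr2 v = toLex (0, (rankOf arr2).getD v 0) := by
  unfold keyF
  rw [if_pos ((contains_rank arr2 v).mpr h)]

theorem keyF_not_mem (arr2 : List Int) (v : Int) (h : v ∉ arr2) :
    keyF arr2 v = toLex (1, v) := by
  unfold keyF
  rw [if_neg (fun hc => h ((contains_rank arr2 v).mp hc))]

-- the final dict of A's first loop

theorem dF_getD (arr1 arr2 : List Int) (v : Int) :
    (arr2.foldl (fun (d : PySem.Dict Int Int) x => d.insert x 0) (PySem.Dict.counter arr1)).getD v 0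
      = if v ∈ arr2 then 0 else (arr1.count v : Int) := by
  rw [foldl_insert_zero_getD, PySem.Dict.getD_counter]

theorem a_eq_sorted (arr1 arr2 : List Int) :
    sort_according_to_another arr1 arr2 = PySem.List.sorted arr1 (keyF arr2) false := by
  set dF := arr2.foldl (fun (d : PySem.Dict Int Int) x => d.insert x 0) (PySem.Dict.counter arr1) with hdF
  have hnodup : dF.keys.Nodup :=
    PySem.Dict.nodup_keys_foldl_insert arr2 (fun _ _ => 0) _ (PySem.Dict.nodup_keys_counter arr1)
  have hitems : dF.items = dF.keys.map (fun k => (k, dF.getD k 0)) :=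
    PySem.Dict.items_eq_map_keys dF hnodup 0
  have hA : sort_according_to_another arr1 arr2
      = ((PySem.List.dedup arr2).flatMap
            (fun v => List.replicate (arr1.count v) v))
        ++ PySem.List.sorted (dF.keys.flatMap (fun k => List.replicate ((dF.getD k 0).toNat) k)) (fun x => x) false := by
    show ((arr2.foldl _ ([], PySem.Dict.counter arr1)).1
        ++ PySem.List.sorted (((arr2.foldl _ ([], PySem.Dict.counter arr1)).2).items.flatMap
            (fun p => List.replicate p.2.toNat p.1)) (fun x => x) false) = _
    rw [loopA arr2 [] (PySem.Dict.counter arr1)]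
    simp only [List.nil_append]
    have h1 : (fun v => List.replicate (((PySem.Dict.counter arr1).getD v 0).toNat) v)
        = (fun v => List.replicate (arr1.count v) v) := by
      funext v; rw [PySem.Dict.getD_counter]; simp
    rw [h1]
    congr 1
    rw [← hdF, hitems, List.flatMap_map]
  have hkeys : ∀ a, a ∈ dF.keys ↔ a ∈ arr1 ∨ a ∈ arr2 := by
    intro a
    rw [hdF, PySem.Dict.keys_foldl_insert, PySem.Dict.keys_counter,
        PySem.Set.update_eq_append_filter]
    simp only [List.mem_append, List.mem_filter, PySem.Set.mem_ofList]
    constructor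
    · rintro (h | ⟨h, _⟩)
      · exact Or.inl h
      · exact Or.inr h
    · rintro (h | h)
      · exact Or.inl h
      · by_cases hm1 : a ∈ arr1
        · exact Or.inl hm1
        · refine Or.inr ⟨h, ?_⟩
          have hno : ¬ a ∈ PySem.Set.ofList arr1 :=
            fun hc => hm1 ((PySem.Set.mem_ofList arr1 a).mp hc)
          simp [PySem.Set.contains, List.contains_eq_mem, hno]
  have hperm : (sort_according_to_another arr1 arr2).Perm arr1 := by
    rw [hA, List.perm_iff_count]
    intro a
    rw [List.count_append]
    have hcount1 : List.count a ((PySem.List.dedup arr2).flatMap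
        (fun v => List.replicate (arr1.count v) v)) = if a ∈ arr2 then arr1.count a else 0 := by
      rw [count_flatMap_replicate _ _ _ (PySem.List.nodup_dedup arr2)]
      by_cases h : a ∈ arr2 <;> simp [h]
    have hcount2 : List.count a (PySem.List.sorted
          (dF.keys.flatMap (fun k => List.replicate ((dF.getD k 0).toNat) k)) (fun x => x) false)
        = if a ∈ arr2 then 0 else arr1.count a := by
      rw [(PySem.List.sorted_perm _ _ _).count_eq,
          count_flatMap_replicate _ _ _ hnodup]
      have hg : dF.getD a 0 = if a ∈ arr2 then 0 else (arr1.count a : Int) := by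
        rw [hdF]; exact dF_getD arr1 arr2 a
      by_cases h2 : a ∈ arr2
      · by_cases hk : a ∈ dF.keys <;> simp [h2, hk, hg]
      · by_cases hk : a ∈ dF.keys
        · simp [hk, h2, hg]
        · have hna : a ∉ arr1 := fun h1 => hk ((hkeys a).mpr (Or.inl h1))
          simp [hk, h2, List.count_eq_zero.mpr hna]
    rw [hcount1, hcount2]
    by_cases h : a ∈ arr2 <;> simp [h]
  have hnm : ∀ b ∈ dF.keys.flatMap (fun k => List.replicate ((dF.getD k 0).toNat) k),
      b ∉ arr2 := by
    intro b hb hb2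
    obtain ⟨k, hk, hbk⟩ := List.mem_flatMap.mp hb
    obtain ⟨hne, hbe⟩ := List.mem_replicate.mp hbk
    subst hbe
    have hg : dF.getD b 0 = 0 := by rw [hdF, dF_getD]; simp [hb2]
    rw [hg] at hne
    simp at hne
  have hpw : (sort_according_to_another arr1 arr2).Pairwise
      (fun a b => keyF arr2 a ≤ keyF arr2 b) := by
    rw [hA, List.pairwise_append]
    refine ⟨?_, ?_, ?_⟩
    · apply pairwise_flatMap_replicate
      refine (dedup_index_pairwise arr2).imp_of_mem ?_
      intro u w hu hw hr
      have hu2 : u ∈ arr2 := (PySem.List.mem_dedup arr2 u).mp hu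
      have hw2 : w ∈ arr2 := (PySem.List.mem_dedup arr2 w).mp hw
      obtain ⟨ku, hku⟩ := mem_index?_some arr2 u hu2
      obtain ⟨kw, hkw⟩ := mem_index?_some arr2 w hw2
      rw [keyF_mem _ _ hu2, keyF_mem _ _ hw2,
          getD_rank_of_index _ _ _ hku, getD_rank_of_index _ _ _ hkw,
          Prod.Lex.toLex_le_toLex]
      right
      refine ⟨rfl, ?_⟩
      show ((ku : Int)) ≤ (kw : Int)
      exact_mod_cast hr ku kw hku hkw
    · refine (PySem.List.sorted_pairwise _ _).imp_of_mem ?_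
      intro a b ha hb hab
      have ha2 : a ∉ arr2 := hnm a ((PySem.List.mem_sorted _ _ _ _).mp ha)
      have hb2 : b ∉ arr2 := hnm b ((PySem.List.mem_sorted _ _ _ _).mp hb)
      rw [keyF_not_mem _ _ ha2, keyF_not_mem _ _ hb2, Prod.Lex.toLex_le_toLex]
      right
      exact ⟨rfl, hab⟩
    · intro a ha b hb
      obtain ⟨v, hv, hav⟩ := List.mem_flatMap.mp ha
      have hae := List.eq_of_mem_replicate hav
      subst hae
      have ha2 : a ∈ arr2 := (PySem.List.mem_dedup arr2 a).mp hv
      have hb2 : b ∉ arr2 := hnm b ((PySem.List.mem_sorted _ _ _ _).mp hb)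
      rw [keyF_mem _ _ ha2, keyF_not_mem _ _ hb2, Prod.Lex.toLex_le_toLex]
      left
      norm_num
  exact PySem.List.eq_of_perm_of_pairwise_le_of_injective (keyF arr2) (keyF_inj arr2)
    (hperm.trans (PySem.List.sorted_perm arr1 (keyF arr2) false).symm) hpw
    (PySem.List.sorted_pairwise arr1 (keyF arr2))

-- ===== VERDICT (by name: the statement is the Claim_ definition above) =====
theorem sort_according_to_another_spec : Claim_equal_sort_according_to_another := by
  intro arr1 arr2 _
  unfold Spec_sort_according_to_another
  rw [a_eq_sorted, alt_eq_sorted]
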